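-- pv_equiv track=rewrite | github.com/philemonholland/agentgolem | src/agentgolem/sleep/consolidation.py | _build_chains
-- ===== SOURCE A (Python) =====
-- def _build_chains(
--     pairs: list[tuple[str, str]],
-- ) -> list[list[tuple[str, str]]]:
--     """Group contradiction pairs into connected chains (union-find)."""
--     parent: dict[str, str] = {}
--
--     def find(x: str) -> str:
--         while parent.get(x, x) != x:
--             parent[x] = parent.get(parent[x], parent[x])
--             x = parent[x]
--         return x
--
--     def union(a: str, b: str) -> None:
--         ra, rb = find(a), find(b)
--         if ra != rb:
--             parent[ra] = rb
--
--     for a, b in pairs: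
--         parent.setdefault(a, a)
--         parent.setdefault(b, b)
--         union(a, b)
--
--     groups: dict[str, list[tuple[str, str]]] = {}
--     for a, b in pairs:
--         root = find(a)
--         groups.setdefault(root, []).append((a, b))
--
--     return list(groups.values())
-- ===== SOURCE B (Python) =====
-- def _build_chains(
--     pairs: list[tuple[str, str]],
-- ) -> list[list[tuple[str, str]]]:
--     """Group contradiction pairs into connected chains (flat component labels)."""
--     label: dict[str, str] = {}
--     for a, b in pairs:
--         label.setdefault(a, a)
--         label.setdefault(b, b)
--         la, lb = label[a], label[b]
--         if la != lb:
--             label = {k: (lb if v == la else v) for k, v in label.items()}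
--
--     groups: dict[str, list[tuple[str, str]]] = {}
--     for a, b in pairs:
--         groups.setdefault(label[a], []).append((a, b))
--
--     return list(groups.values())
-- ===== Notes on version B (the rewrite author's own statement) =====
-- stated objective: simpler
-- what changed: Replaces A's union-find forest (parent-pointer dict with find/path-halving and union by root) by a flat node-to-component-label dict that eagerly relabels the whole map on each merge, then groups pairs by the label of their first element.
import Mathlib
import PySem

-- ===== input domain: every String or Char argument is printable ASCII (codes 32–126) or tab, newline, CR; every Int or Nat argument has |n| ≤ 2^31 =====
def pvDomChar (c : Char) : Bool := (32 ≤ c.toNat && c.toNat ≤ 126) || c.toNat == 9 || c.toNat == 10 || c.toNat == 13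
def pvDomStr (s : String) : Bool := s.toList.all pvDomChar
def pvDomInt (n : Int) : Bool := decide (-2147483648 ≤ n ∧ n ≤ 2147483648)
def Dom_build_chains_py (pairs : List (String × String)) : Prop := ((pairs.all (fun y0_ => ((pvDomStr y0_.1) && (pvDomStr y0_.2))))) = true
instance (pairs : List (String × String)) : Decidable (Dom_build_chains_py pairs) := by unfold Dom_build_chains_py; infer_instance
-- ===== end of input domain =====

-- B replaces A's union-find forest (parent pointers, find with path halving) by a flat
-- node→component-label map with eager whole-map relabelling on each merge; same return value.

-- ===== PORT A =====
-- while parent.get(x, x) != x: parent[x] = parent.get(parent[x], parent[x]); x = parent[x]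
-- (fuel makes the while-loop total; p.size + 1 iterations always suffice — proved below)
def pvFindGo (p : PySem.Dict String String) (x : String) : Nat → String × PySem.Dict String String
  | 0 => (x, p)
  | fuel+1 =>
    if p.getD x x ≠ x then
      let px := p.getD x x
      let gp := p.getD px px
      pvFindGo (p.insert x gp) gp fuel
    else (x, p)

def pvFind (p : PySem.Dict String String) (x : String) : String × PySem.Dict String String :=
  pvFindGo p x (p.size + 1)

-- ra, rb = find(a), find(b); if ra != rb: parent[ra] = rb
def pvUnion (p : PySem.Dict String String) (a b : String) : PySem.Dict String String :=
  let r1 := pvFind p a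
  let r2 := pvFind r1.2 b
  if r1.1 ≠ r2.1 then r2.2.insert r1.1 r2.1 else r2.2

-- parent.setdefault(a, a); parent.setdefault(b, b); union(a, b)
def pvStepA (p : PySem.Dict String String) (ab : String × String) : PySem.Dict String String :=
  let p := p.setdefault ab.1 ab.1
  let p := p.setdefault ab.2 ab.2
  pvUnion p ab.1 ab.2

-- root = find(a); groups.setdefault(root, []).append((a, b))   (find mutates parent)
def pvGrpA (s : PySem.Dict String (List (String × String)) × PySem.Dict String String)
    (ab : String × String) :
    PySem.Dict String (List (String × String)) × PySem.Dict String String :=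
  let r := pvFind s.2 ab.1
  (s.1.insert r.1 (s.1.getD r.1 [] ++ [ab]), r.2)

def build_chains_py (pairs : List (String × String)) : List (List (String × String)) :=
  let parent := pairs.foldl pvStepA PySem.Dict.empty
  let gp := pairs.foldl pvGrpA (PySem.Dict.empty, parent)
  gp.1.values

-- ===== PORT B =====
-- label = {k: (lb if v == la else v) for k, v in label.items()}
def pvRelabel (L : PySem.Dict String String) (la lb : String) : PySem.Dict String String :=
  PySem.Dict.mk (L.items.map (fun kv => (kv.1, if kv.2 = la then lb else kv.2)))

def pvStepB (L : PySem.Dict String String) (ab : String × String) : PySem.Dict String String :=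
  let L := L.setdefault ab.1 ab.1
  let L := L.setdefault ab.2 ab.2
  let la := L.getD ab.1 ab.1   -- label[a]; ab.1 is always a key here, so getD is exact
  let lb := L.getD ab.2 ab.2   -- label[b]
  if la ≠ lb then pvRelabel L la lb else L

-- groups.setdefault(label[a], []).append((a, b))
def pvGrpB (label : PySem.Dict String String)
    (g : PySem.Dict String (List (String × String))) (ab : String × String) :
    PySem.Dict String (List (String × String)) :=
  let r := label.getD ab.1 ab.1   -- label[a]; ab.1 is always a key of label
  g.insert r (g.getD r [] ++ [ab])

def build_chains_py_alt (pairs : List (String × String)) : List (List (String × String)) :=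
  let label := pairs.foldl pvStepB PySem.Dict.empty
  let groups := pairs.foldl (pvGrpB label) PySem.Dict.empty
  groups.values

-- ===== PRECONDITION & SPEC =====
def Spec_build_chains_py (pairs : List (String × String)) (out : List (List (String × String))) : Prop := out = build_chains_py_alt pairs
instance (pairs : List (String × String)) (out : List (List (String × String))) : Decidable (Spec_build_chains_py pairs out) := by unfold Spec_build_chains_py; infer_instance

-- ===== CLAIM (what is proved, stated in full; the proofs are below) =====
def Claim_equal_build_chains_py : Prop := ∀ (pairs : List (String × String)), Dom_build_chains_py pairs → Spec_build_chains_py pairs (build_chains_py pairs)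

-- ===== LEMMAS AND PROOFS =====

-- One parent-pointer step of A's forest.
def pvStep (p : PySem.Dict String String) (x : String) : String := p.getD x x

def IsRootP (p : PySem.Dict String String) (x : String) : Prop := pvStep p x = x

-- The root of x in A's forest (p.size iterations always reach it; root_reached below).
def pvRootp (p : PySem.Dict String String) (x : String) : String := (pvStep p)^[p.size] x

def AcycP (p : PySem.Dict String String) : Prop :=
  ∀ x, ∃ n, IsRootP p ((pvStep p)^[n] x)

def ClosedP (p : PySem.Dict String String) : Prop :=
  ∀ x, p.contains x = true → p.contains (pvStep p x) = true

def GoodP (p : PySem.Dict String String) : Prop := ClosedP p ∧ AcycP p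

theorem step_insert (p : PySem.Dict String String) (u v y : String) :
    pvStep (p.insert u v) y = if y = u then v else pvStep p y := by
  simp [pvStep, PySem.Dict.getD_insert]

theorem step_nonkey (p : PySem.Dict String String) (x : String)
    (h : p.contains x = false) : pvStep p x = x := by
  simp [pvStep, PySem.Dict.getD_of_not_contains p x h]

theorem key_of_step_ne (p : PySem.Dict String String) (x : String)
    (h : pvStep p x ≠ x) : p.contains x = true := by
  cases hc : p.contains x with
  | false => exact absurd (step_nonkey p x hc) h
  | true => rfl

theorem iter_fix (p : PySem.Dict String String) (x : String)
    (h : IsRootP p x) : ∀ n, (pvStep p)^[n] x = x := by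
  intro n; induction n with
  | zero => rfl
  | succ n ih => rw [Function.iterate_succ_apply, h, ih]

theorem iter_stable (p : PySem.Dict String String) (x : String) (n : Nat)
    (h : IsRootP p ((pvStep p)^[n] x)) :
    ∀ m, n ≤ m → (pvStep p)^[m] x = (pvStep p)^[n] x := by
  intro m hm
  obtain ⟨k, rfl⟩ := Nat.exists_eq_add_of_le hm
  rw [Nat.add_comm, Function.iterate_add_apply]
  exact iter_fix p _ h k

theorem size_eq_keys_length (p : PySem.Dict String String) : p.size = p.keys.length := by
  simp [PySem.Dict.size, PySem.Dict.keys]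

theorem root_reached (p : PySem.Dict String String) (hg : GoodP p) (x : String) :
    IsRootP p ((pvStep p)^[p.size] x) := by
  classical
  have hex := hg.2 x
  have hroot : IsRootP p ((pvStep p)^[Nat.find hex] x) := Nat.find_spec hex
  have hle : Nat.find hex ≤ p.size := by
    by_contra hlt
    rw [Nat.not_le] at hlt
    have haux : ∀ i j : Nat, i < j → j < Nat.find hex → (pvStep p)^[i] x ≠ (pvStep p)^[j] x := by
      intro i j hij hj he
      have hper : (pvStep p)^[Nat.find hex - j + i] x = (pvStep p)^[Nat.find hex] x := by
        have h1 : Nat.find hex = Nat.find hex - j + j := by omega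
        conv_rhs => rw [h1]
        rw [Function.iterate_add_apply, he, ← Function.iterate_add_apply]
      have : IsRootP p ((pvStep p)^[Nat.find hex - j + i] x) := by
        rw [hper]; exact hroot
      exact Nat.find_min hex (by omega) this
    have hinj : Set.InjOn (fun i => (pvStep p)^[i] x) ↑(Finset.range (Nat.find hex)) := by
      intro i hi j hj he
      simp only [Finset.coe_range, Set.mem_Iio] at hi hj
      by_contra hne
      rcases Nat.lt_or_ge i j with h | h
      · exact haux i j h hj he
      · exact haux j i (by omega) hi he.symm
    have hmaps : ∀ i ∈ Finset.range (Nat.find hex),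
        (pvStep p)^[i] x ∈ p.keys.toFinset := by
      intro i hi
      rw [Finset.mem_range] at hi
      have hnr : ¬ IsRootP p ((pvStep p)^[i] x) := Nat.find_min hex hi
      exact List.mem_toFinset.2
        ((PySem.Dict.contains_iff_mem_keys p _).1 (key_of_step_ne p _ hnr))
    have h1 : (Finset.range (Nat.find hex)).card ≤ p.keys.toFinset.card :=
      Finset.card_le_card_of_injOn _ hmaps hinj
    have h2 : p.keys.toFinset.card ≤ p.keys.length := p.keys.toFinset_card_le
    rw [Finset.card_range] at h1
    have h3 := size_eq_keys_length p
    omega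
  rw [iter_stable p x (Nat.find hex) hroot p.size hle]
  exact hroot

theorem root_unique (p : PySem.Dict String String) (hg : GoodP p) (x : String) (n : Nat)
    (h : IsRootP p ((pvStep p)^[n] x)) : pvRootp p x = (pvStep p)^[n] x := by
  rcases Nat.le_total n p.size with hle | hle
  · exact iter_stable p x n h p.size hle
  · exact (iter_stable p x p.size (root_reached p hg x) n hle).symm

theorem root_of_isRoot (p : PySem.Dict String String) (x : String)
    (h : IsRootP p x) : pvRootp p x = x := iter_fix p x h p.size

theorem root_isRoot (p : PySem.Dict String String) (hg : GoodP p) (x : String) :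
    IsRootP p (pvRootp p x) := root_reached p hg x

theorem root_step (p : PySem.Dict String String) (hg : GoodP p) (x : String) :
    pvRootp p (pvStep p x) = pvRootp p x := by
  have : (pvStep p)^[p.size] (pvStep p x) = (pvStep p)^[p.size + 1] x := by
    rw [Function.iterate_succ_apply]
  rw [pvRootp, this, iter_stable p x p.size (root_reached p hg x) (p.size+1) (Nat.le_succ _)]
  rfl

theorem root_iter (p : PySem.Dict String String) (hg : GoodP p) (n : Nat) (x : String) :
    pvRootp p ((pvStep p)^[n] x) = pvRootp p x := by
  induction n with
  | zero => rfl
  | succ n ih => rw [Function.iterate_succ_apply', root_step p hg, ih]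

theorem contains_iter (p : PySem.Dict String String) (hc : ClosedP p) (x : String)
    (h : p.contains x = true) : ∀ n, p.contains ((pvStep p)^[n] x) = true := by
  intro n; induction n with
  | zero => exact h
  | succ n ih => rw [Function.iterate_succ_apply']; exact hc _ ih

theorem root_key (p : PySem.Dict String String) (hg : GoodP p) (x : String)
    (h : p.contains x = true) : p.contains (pvRootp p x) = true :=
  contains_iter p hg.1 x h p.size

theorem no_return (p : PySem.Dict String String) (hg : GoodP p) (x : String)
    (hx : pvStep p x ≠ x) : ∀ j, 1 ≤ j → (pvStep p)^[j] x ≠ x := by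
  intro j hj he
  obtain ⟨n, hn⟩ := hg.2 x
  have hmul : ∀ q : Nat, (pvStep p)^[q * j] x = x := by
    intro q
    induction q with
    | zero => simp
    | succ q ih => rw [Nat.succ_mul, Function.iterate_add_apply, he, ih]
  have hle : n ≤ n * j := Nat.le_mul_of_pos_right n (by omega)
  have : (pvStep p)^[n * j] x = (pvStep p)^[n] x := iter_stable p x n hn (n * j) hle
  rw [hmul n] at this
  have hxr : IsRootP p x := by rw [IsRootP, this]; exact hn
  exact hx hxr

-- ===== compression: p.insert x ((pvStep p)^[2] x) preserves roots =====

theorem compress_iter (p : PySem.Dict String String) (hg : GoodP p) (x : String)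
    (hx : pvStep p x ≠ x) :
    ∀ k, (pvStep (p.insert x ((pvStep p)^[2] x)))^[k] ((pvStep p)^[2] x)
       = (pvStep p)^[k] ((pvStep p)^[2] x) := by
  intro k
  set gp := (pvStep p)^[2] x with hgp
  induction k with
  | zero => rfl
  | succ k ih =>
    rw [Function.iterate_succ_apply', Function.iterate_succ_apply', ih, step_insert]
    have hne : (pvStep p)^[k] gp ≠ x := by
      rw [hgp, ← Function.iterate_add_apply]
      exact no_return p hg x hx (k + 2) (by omega)
    rw [if_neg hne]

theorem compress_core (p : PySem.Dict String String) (hg : GoodP p) (x : String)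
    (hx : pvStep p x ≠ x) :
    ∀ n y, IsRootP p ((pvStep p)^[n] y) →
      ∃ m, (pvStep (p.insert x ((pvStep p)^[2] x)))^[m] y = pvRootp p y ∧
        IsRootP (p.insert x ((pvStep p)^[2] x)) ((pvStep (p.insert x ((pvStep p)^[2] x)))^[m] y) := by
  intro n
  induction n using Nat.strong_induction_on with
  | _ n ih =>
    intro y hy
    by_cases hroot : IsRootP p y
    · have hyx : y ≠ x := fun h => hx (h ▸ hroot)
      refine ⟨0, ?_, ?_⟩
      · exact (root_of_isRoot p y hroot).symm
      · show pvStep _ y = y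
        rw [step_insert, if_neg hyx]; exact hroot
    · have hn1 : 1 ≤ n := by
        rcases n with _ | n
        · exact absurd hy hroot
        · omega
      by_cases hyx : y = x
      · subst hyx
        have hstep' : pvStep (p.insert y ((pvStep p)^[2] y)) y = (pvStep p)^[2] y := by
          rw [step_insert, if_pos rfl]
        have hgp : IsRootP p ((pvStep p)^[n - 1] ((pvStep p)^[2] y)) := by
          rw [← Function.iterate_add_apply]
          have h2 : n - 1 + 2 = n + 1 := by omega
          rw [h2, iter_stable p y n hy (n + 1) (by omega)]
          exact hy
        obtain ⟨m, hm1, hm2⟩ := ih (n - 1) (by omega) ((pvStep p)^[2] y) hgp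
        refine ⟨m + 1, ?_, ?_⟩
        · rw [Function.iterate_succ_apply (pvStep (p.insert y ((pvStep p)^[2] y))) m y, hstep',
            hm1, root_iter p hg 2 y]
        · rw [Function.iterate_succ_apply (pvStep (p.insert y ((pvStep p)^[2] y))) m y, hstep']
          exact hm2
      · have hstep' : pvStep (p.insert x ((pvStep p)^[2] x)) y = pvStep p y := by
          rw [step_insert, if_neg hyx]
        have hz : IsRootP p ((pvStep p)^[n - 1] (pvStep p y)) := by
          rw [← Function.iterate_succ_apply]
          have h2 : (n - 1).succ = n := by omega
          rw [h2]; exact hy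
        obtain ⟨m, hm1, hm2⟩ := ih (n - 1) (by omega) (pvStep p y) hz
        refine ⟨m + 1, ?_, ?_⟩
        · rw [Function.iterate_succ_apply (pvStep (p.insert x ((pvStep p)^[2] x))) m y, hstep',
            hm1, root_step p hg]
        · rw [Function.iterate_succ_apply (pvStep (p.insert x ((pvStep p)^[2] x))) m y, hstep']
          exact hm2

theorem compress_spec (p : PySem.Dict String String) (hg : GoodP p) (x : String)
    (hx : pvStep p x ≠ x) :
    GoodP (p.insert x ((pvStep p)^[2] x)) ∧
    (∀ y, pvRootp (p.insert x ((pvStep p)^[2] x)) y = pvRootp p y) ∧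
    (p.insert x ((pvStep p)^[2] x)).keys = p.keys := by
  have hcx : p.contains x = true := key_of_step_ne p x hx
  have hkeys : (p.insert x ((pvStep p)^[2] x)).keys = p.keys :=
    PySem.Dict.keys_insert_of_contains p _ hcx
  have hcont : ∀ z, (p.insert x ((pvStep p)^[2] x)).contains z = p.contains z := by
    intro z
    rw [PySem.Dict.contains_eq_decide_mem_keys, PySem.Dict.contains_eq_decide_mem_keys, hkeys]
  have hacyc : AcycP (p.insert x ((pvStep p)^[2] x)) := by
    intro y
    obtain ⟨n, hn⟩ := hg.2 y
    obtain ⟨m, _, hm2⟩ := compress_core p hg x hx n y hn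
    exact ⟨m, hm2⟩
  have hclosed : ClosedP (p.insert x ((pvStep p)^[2] x)) := by
    intro y hy
    rw [hcont] at hy
    rw [hcont]
    by_cases hyx : y = x
    · subst hyx
      rw [step_insert, if_pos rfl]
      exact contains_iter p hg.1 y hy 2
    · rw [step_insert, if_neg hyx]
      exact hg.1 y hy
  have hg' : GoodP (p.insert x ((pvStep p)^[2] x)) := ⟨hclosed, hacyc⟩
  refine ⟨hg', ?_, hkeys⟩
  intro y
  obtain ⟨n, hn⟩ := hg.2 y
  obtain ⟨m, hm1, hm2⟩ := compress_core p hg x hx n y hn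
  rw [root_unique _ hg' y m hm2, hm1]

-- ===== union: p.insert u v for roots u ≠ v redirects u's class to v =====

theorem union_spec (p : PySem.Dict String String) (hg : GoodP p) (u v : String)
    (hu : IsRootP p u) (hv : IsRootP p v) (hne : u ≠ v)
    (hcu : p.contains u = true) (hcv : p.contains v = true) :
    GoodP (p.insert u v) ∧
    (∀ y, pvRootp (p.insert u v) y = if pvRootp p y = u then v else pvRootp p y) ∧
    (p.insert u v).keys = p.keys := by
  have hkeys : (p.insert u v).keys = p.keys := PySem.Dict.keys_insert_of_contains p _ hcu
  have hcont : ∀ z, (p.insert u v).contains z = p.contains z := by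
    intro z
    rw [PySem.Dict.contains_eq_decide_mem_keys, PySem.Dict.contains_eq_decide_mem_keys, hkeys]
  have hvne : v ≠ u := fun h => hne h.symm
  have hrootv : IsRootP (p.insert u v) v := by
    show pvStep _ v = v
    rw [step_insert, if_neg hvne]; exact hv
  have core : ∀ n y, IsRootP p ((pvStep p)^[n] y) →
      ∃ m, (pvStep (p.insert u v))^[m] y = (if pvRootp p y = u then v else pvRootp p y) ∧
        IsRootP (p.insert u v) ((pvStep (p.insert u v))^[m] y) := by
    intro n
    induction n using Nat.strong_induction_on with
    | _ n ih =>
      intro y hy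
      by_cases hroot : IsRootP p y
      · have hry : pvRootp p y = y := root_of_isRoot p y hroot
        by_cases hyu : y = u
        · subst hyu
          refine ⟨1, ?_, ?_⟩
          · rw [Function.iterate_one, step_insert, if_pos rfl, hry, if_pos rfl]
          · rw [Function.iterate_one, step_insert, if_pos rfl]; exact hrootv
        · refine ⟨0, ?_, ?_⟩
          · rw [Function.iterate_zero_apply, hry, if_neg hyu]
          · show pvStep _ y = y
            rw [step_insert, if_neg hyu]; exact hroot
      · have hn1 : 1 ≤ n := by
          rcases n with _ | n
          · exact absurd hy hroot
          · omega
        have hyu : y ≠ u := fun h => hroot (h ▸ hu)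
        have hstep' : pvStep (p.insert u v) y = pvStep p y := by
          rw [step_insert, if_neg hyu]
        have hz : IsRootP p ((pvStep p)^[n - 1] (pvStep p y)) := by
          rw [← Function.iterate_succ_apply]
          have h2 : (n - 1).succ = n := by omega
          rw [h2]; exact hy
        obtain ⟨m, hm1, hm2⟩ := ih (n - 1) (by omega) (pvStep p y) hz
        refine ⟨m + 1, ?_, ?_⟩
        · rw [Function.iterate_succ_apply (pvStep (p.insert u v)) m y, hstep', hm1,
            root_step p hg]
        · rw [Function.iterate_succ_apply (pvStep (p.insert u v)) m y, hstep']
          exact hm2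
  have hacyc : AcycP (p.insert u v) := by
    intro y
    obtain ⟨n, hn⟩ := hg.2 y
    obtain ⟨m, _, hm2⟩ := core n y hn
    exact ⟨m, hm2⟩
  have hclosed : ClosedP (p.insert u v) := by
    intro y hy
    rw [hcont] at hy
    rw [hcont]
    by_cases hyu : y = u
    · subst hyu
      rw [step_insert, if_pos rfl]; exact hcv
    · rw [step_insert, if_neg hyu]
      exact hg.1 y hy
  have hg' : GoodP (p.insert u v) := ⟨hclosed, hacyc⟩
  refine ⟨hg', ?_, hkeys⟩
  intro y
  obtain ⟨n, hn⟩ := hg.2 y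
  obtain ⟨m, hm1, hm2⟩ := core n y hn
  rw [root_unique _ hg' y m hm2, hm1]

-- ===== find =====

theorem findGo_spec : ∀ (fuel n : Nat) (p : PySem.Dict String String) (x : String),
    GoodP p → IsRootP p ((pvStep p)^[n] x) → n < fuel →
    (pvFindGo p x fuel).1 = pvRootp p x ∧ GoodP (pvFindGo p x fuel).2 ∧
    (∀ y, pvRootp (pvFindGo p x fuel).2 y = pvRootp p y) ∧
    (pvFindGo p x fuel).2.keys = p.keys := by
  intro fuel
  induction fuel with
  | zero => intro n p x _ _ h; omega
  | succ fuel ih =>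
    intro n p x hg hn hlt
    by_cases hx : pvStep p x = x
    · have heq : pvFindGo p x (fuel + 1) = (x, p) := by
        simp only [pvFindGo]
        rw [if_neg (not_not_intro (show p.getD x x = x from hx))]
      rw [heq]
      exact ⟨(root_of_isRoot p x hx).symm, hg, fun y => rfl, rfl⟩
    · have hgp : p.getD (p.getD x x) (p.getD x x) = (pvStep p)^[2] x := by
        show pvStep p (pvStep p x) = _
        rw [Function.iterate_succ_apply', Function.iterate_one]
      have heq : pvFindGo p x (fuel + 1)
          = pvFindGo (p.insert x ((pvStep p)^[2] x)) ((pvStep p)^[2] x) fuel := by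
        simp only [pvFindGo]
        rw [if_pos (show p.getD x x ≠ x from hx), hgp]
      have hn1 : 1 ≤ n := by
        rcases n with _ | n
        · exact absurd hn hx
        · omega
      obtain ⟨hg', hroots, hkeys⟩ := compress_spec p hg x hx
      have hr : IsRootP (p.insert x ((pvStep p)^[2] x))
          ((pvStep (p.insert x ((pvStep p)^[2] x)))^[n - 1] ((pvStep p)^[2] x)) := by
        rw [compress_iter p hg x hx (n - 1)]
        have e1 : (pvStep p)^[n - 1] ((pvStep p)^[2] x) = (pvStep p)^[n] x := by
          rw [← Function.iterate_add_apply]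
          have h2 : n - 1 + 2 = n + 1 := by omega
          rw [h2, iter_stable p x n hn (n + 1) (Nat.le_succ _)]
        rw [e1]
        have hrx : (pvStep p)^[n] x ≠ x := no_return p hg x hx n (by omega)
        show pvStep _ _ = _
        rw [step_insert, if_neg hrx]
        exact hn
      obtain ⟨r1, r2, r3, r4⟩ :=
        ih (n - 1) (p.insert x ((pvStep p)^[2] x)) ((pvStep p)^[2] x) hg' hr (by omega)
      rw [heq]
      refine ⟨?_, r2, ?_, ?_⟩
      · rw [r1, hroots, root_iter p hg 2 x]
      · intro y; rw [r3 y, hroots]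
      · rw [r4, hkeys]

theorem find_spec (p : PySem.Dict String String) (hg : GoodP p) (x : String) :
    (pvFind p x).1 = pvRootp p x ∧ GoodP (pvFind p x).2 ∧
    (∀ y, pvRootp (pvFind p x).2 y = pvRootp p y) ∧
    (pvFind p x).2.keys = p.keys :=
  findGo_spec (p.size + 1) p.size p x hg (root_reached p hg x) (Nat.lt_succ_self _)

-- ===== fresh self-insert (setdefault) =====

theorem selfinsert_spec (p : PySem.Dict String String) (hg : GoodP p) (a : String)
    (hc : p.contains a = false) :
    GoodP (p.insert a a) ∧ (∀ y, pvRootp (p.insert a a) y = pvRootp p y) := by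
  have hstepeq : ∀ y, pvStep (p.insert a a) y = pvStep p y := by
    intro y
    rw [step_insert]
    by_cases hya : y = a
    · rw [if_pos hya, hya, step_nonkey p a hc]
    · rw [if_neg hya]
  have hfun : pvStep (p.insert a a) = pvStep p := funext hstepeq
  have hclosed : ClosedP (p.insert a a) := by
    intro y hy
    rw [hfun, PySem.Dict.contains_insert]
    by_cases hya : y = a
    · subst hya
      rw [step_nonkey p y hc]
      simp
    · rw [PySem.Dict.contains_insert] at hy
      have hy' : p.contains y = true := by
        simp only [Bool.or_eq_true, beq_iff_eq] at hy
        exact hy.resolve_left hya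
      rw [hg.1 y hy']
      simp
  have hacyc : AcycP (p.insert a a) := by
    intro y
    obtain ⟨n, hn⟩ := hg.2 y
    exact ⟨n, by rw [IsRootP, hfun]; exact hn⟩
  refine ⟨⟨hclosed, hacyc⟩, ?_⟩
  intro y
  have hsz : (p.insert a a).size = p.size + 1 := by
    rw [PySem.Dict.size_insert]
    simp [hc]
  rw [pvRootp, hfun, hsz,
    iter_stable p y p.size (root_reached p hg y) (p.size + 1) (Nat.le_succ _)]
  rfl

-- ===== relabel (B side) =====

theorem keys_relabel (L : PySem.Dict String String) (la lb : String) :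
    (pvRelabel L la lb).keys = L.keys := by
  simp [pvRelabel, PySem.Dict.keys, List.map_map, Function.comp]

theorem get?_relabel (L : PySem.Dict String String) (la lb x : String) :
    (pvRelabel L la lb).get? x = (L.get? x).map (fun v => if v = la then lb else v) := by
  obtain ⟨items⟩ := L
  induction items with
  | nil => rfl
  | cons kv rest ih =>
    obtain ⟨k, v⟩ := kv
    by_cases h : (k == x) = true
    · simp [pvRelabel, PySem.Dict.get?_mk_cons, h]
    · simp only [pvRelabel, List.map_cons, PySem.Dict.get?_mk_cons, h] at ih ⊢
      simp only [Bool.false_eq_true, if_false]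
      exact ih

-- ===== the synchronisation invariant and the main proof =====

def InvAB (P L : PySem.Dict String String) : Prop :=
  GoodP P ∧ (∀ x, P.contains x = L.contains x) ∧ (∀ x, pvRootp P x = L.getD x x)

theorem InvAB_empty : InvAB PySem.Dict.empty PySem.Dict.empty := by
  refine ⟨⟨?_, ?_⟩, fun x => rfl, ?_⟩
  · intro x hx
    simp [PySem.Dict.contains_empty] at hx
  · intro x
    exact ⟨0, by simp [IsRootP, pvStep, PySem.Dict.getD_empty]⟩
  · intro x
    simp [pvRootp, PySem.Dict.size_empty, PySem.Dict.getD_empty]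

theorem sd_sync (P L : PySem.Dict String String) (a : String) (h : InvAB P L) :
    InvAB (P.setdefault a a) (L.setdefault a a) := by
  obtain ⟨hg, hsync, hroot⟩ := h
  by_cases hca : P.contains a = true
  · have hcl : L.contains a = true := by rw [← hsync]; exact hca
    rw [PySem.Dict.setdefault_of_contains P a hca, PySem.Dict.setdefault_of_contains L a hcl]
    exact ⟨hg, hsync, hroot⟩
  · have hca' : P.contains a = false := by
      cases h' : P.contains a
      · rfl
      · exact absurd h' hca
    have hcl : L.contains a = false := by rw [← hsync]; exact hca'
    rw [PySem.Dict.setdefault_of_not_contains P a hca',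
      PySem.Dict.setdefault_of_not_contains L a hcl]
    obtain ⟨hg', hroots'⟩ := selfinsert_spec P hg a hca'
    refine ⟨hg', ?_, ?_⟩
    · intro x
      rw [PySem.Dict.contains_insert, PySem.Dict.contains_insert, hsync]
    · intro x
      rw [hroots' x, PySem.Dict.getD_insert]
      by_cases hxa : x = a
      · rw [if_pos hxa, hxa]
        exact root_of_isRoot P a (step_nonkey P a hca')
      · rw [if_neg hxa]
        exact hroot x

theorem stepAB (P L : PySem.Dict String String) (ab : String × String) (h : InvAB P L) :
    InvAB (pvStepA P ab) (pvStepB L ab) := by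
  obtain ⟨a, b⟩ := ab
  obtain ⟨hg2, hsync2, hroot2⟩ := sd_sync _ _ b (sd_sync P L a h)
  have hca : ((P.setdefault a a).setdefault b b).contains a = true := by
    simp [PySem.Dict.contains_setdefault]
  have hcb : ((P.setdefault a a).setdefault b b).contains b = true := by
    simp [PySem.Dict.contains_setdefault]
  show InvAB (pvUnion ((P.setdefault a a).setdefault b b) a b)
    (let L2 := (L.setdefault a a).setdefault b b;
     if L2.getD a a ≠ L2.getD b b
     then pvRelabel L2 (L2.getD a a) (L2.getD b b) else L2)
  set P2 := (P.setdefault a a).setdefault b b with hP2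
  set L2 := (L.setdefault a a).setdefault b b with hL2
  obtain ⟨f1r, f1g, f1root, f1keys⟩ := find_spec P2 hg2 a
  obtain ⟨f2r, f2g, f2root, f2keys⟩ := find_spec (pvFind P2 a).2 f1g b
  have hra : (pvFind P2 a).1 = pvRootp P2 a := f1r
  have hrb : (pvFind (pvFind P2 a).2 b).1 = pvRootp P2 b := by rw [f2r, f1root]
  have hla : L2.getD a a = pvRootp P2 a := (hroot2 a).symm
  have hlb : L2.getD b b = pvRootp P2 b := (hroot2 b).symm
  have hP4root : ∀ x, pvRootp (pvFind (pvFind P2 a).2 b).2 x = pvRootp P2 x := by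
    intro x; rw [f2root, f1root]
  have hP4keys : (pvFind (pvFind P2 a).2 b).2.keys = P2.keys := by rw [f2keys, f1keys]
  have hP4cont : ∀ z, (pvFind (pvFind P2 a).2 b).2.contains z = P2.contains z := by
    intro z
    rw [PySem.Dict.contains_eq_decide_mem_keys, PySem.Dict.contains_eq_decide_mem_keys, hP4keys]
  show InvAB
    (if (pvFind P2 a).1 ≠ (pvFind (pvFind P2 a).2 b).1
     then (pvFind (pvFind P2 a).2 b).2.insert (pvFind P2 a).1 (pvFind (pvFind P2 a).2 b).1
     else (pvFind (pvFind P2 a).2 b).2)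
    (if L2.getD a a ≠ L2.getD b b
     then pvRelabel L2 (L2.getD a a) (L2.getD b b) else L2)
  rw [hra, hrb, hla, hlb]
  by_cases hne : pvRootp P2 a = pvRootp P2 b
  · rw [if_neg (not_not_intro hne), if_neg (not_not_intro hne)]
    refine ⟨f2g, ?_, ?_⟩
    · intro x; rw [hP4cont x, hsync2 x]
    · intro x; rw [hP4root x]; exact hroot2 x
  · rw [if_pos hne, if_pos hne]
    have hu : IsRootP (pvFind (pvFind P2 a).2 b).2 (pvRootp P2 a) := by
      rw [← hP4root a]
      exact root_isRoot _ f2g a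
    have hv : IsRootP (pvFind (pvFind P2 a).2 b).2 (pvRootp P2 b) := by
      rw [← hP4root b]
      exact root_isRoot _ f2g b
    have hcu : (pvFind (pvFind P2 a).2 b).2.contains (pvRootp P2 a) = true := by
      rw [hP4cont]
      exact root_key P2 hg2 a hca
    have hcv : (pvFind (pvFind P2 a).2 b).2.contains (pvRootp P2 b) = true := by
      rw [hP4cont]
      exact root_key P2 hg2 b hcb
    obtain ⟨hg5, hroot5, hkeys5⟩ :=
      union_spec (pvFind (pvFind P2 a).2 b).2 f2g (pvRootp P2 a) (pvRootp P2 b) hu hv hne hcu hcv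
    refine ⟨hg5, ?_, ?_⟩
    · intro x
      have h5 : ((pvFind (pvFind P2 a).2 b).2.insert (pvRootp P2 a) (pvRootp P2 b)).contains x
          = P2.contains x := by
        rw [PySem.Dict.contains_eq_decide_mem_keys, hkeys5, hP4keys,
          ← PySem.Dict.contains_eq_decide_mem_keys]
      have hL5 : (pvRelabel L2 (pvRootp P2 a) (pvRootp P2 b)).contains x = L2.contains x := by
        rw [PySem.Dict.contains_eq_decide_mem_keys, keys_relabel,
          ← PySem.Dict.contains_eq_decide_mem_keys]
      rw [h5, hL5, hsync2]
    · intro x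
      rw [hroot5 x, hP4root x, PySem.Dict.getD_eq_get?_getD, get?_relabel]
      cases hLx : L2.get? x with
      | some v =>
        have hgd : L2.getD x x = v := PySem.Dict.getD_of_get?_eq_some L2 x hLx
        have hvx : v = pvRootp P2 x := by rw [← hgd, ← hroot2 x]
        simp only [Option.map_some, Option.getD_some]
        rw [hvx]
      | none =>
        have hcx : L2.contains x = false := (PySem.Dict.get?_eq_none_iff_contains L2 x).1 hLx
        have hpx : P2.contains x = false := by rw [hsync2]; exact hcx
        have hrx : pvRootp P2 x = x := root_of_isRoot P2 x (step_nonkey P2 x hpx)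
        have hxa : x ≠ pvRootp P2 a := by
          intro hcontr
          have hk := root_key P2 hg2 a hca
          rw [← hcontr] at hk
          rw [hk] at hpx
          simp at hpx
        simp only [Option.map_none, Option.getD_none]
        rw [hrx, if_neg hxa]

theorem pass1 (pairs : List (String × String)) :
    ∀ P L, InvAB P L → InvAB (pairs.foldl pvStepA P) (pairs.foldl pvStepB L) := by
  induction pairs with
  | nil => intro P L h; exact h
  | cons ab rest ih =>
    intro P L h
    simp only [List.foldl_cons]
    exact ih _ _ (stepAB P L ab h)

theorem pass2 (L : PySem.Dict String String) (pairs : List (String × String)) :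
    ∀ (g : PySem.Dict String (List (String × String))) (P : PySem.Dict String String),
      GoodP P → (∀ x, pvRootp P x = L.getD x x) →
      (pairs.foldl pvGrpA (g, P)).1 = pairs.foldl (pvGrpB L) g := by
  induction pairs with
  | nil => intro g P _ _; rfl
  | cons ab rest ih =>
    intro g P hg hroot
    obtain ⟨fr, fgg, froot, fkeys⟩ := find_spec P hg ab.1
    simp only [List.foldl_cons]
    have hstep : pvGrpA (g, P) ab = (pvGrpB L g ab, (pvFind P ab.1).2) := by
      have hkey : (pvFind P ab.1).1 = L.getD ab.1 ab.1 := by rw [fr, hroot]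
      simp only [pvGrpA, pvGrpB, hkey]
    rw [hstep]
    exact ih (pvGrpB L g ab) (pvFind P ab.1).2 fgg (fun x => by rw [froot x, hroot x])

theorem build_chains_py_spec : Claim_equal_build_chains_py := by
  unfold Claim_equal_build_chains_py
  intro pairs _
  unfold Spec_build_chains_py build_chains_py build_chains_py_alt
  obtain ⟨hg, hsync, hroot⟩ := pass1 pairs PySem.Dict.empty PySem.Dict.empty InvAB_empty
  have h2 := pass2 (pairs.foldl pvStepB PySem.Dict.empty) pairs PySem.Dict.empty
    (pairs.foldl pvStepA PySem.Dict.empty) hg hroot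
  simp only []
  rw [h2]
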